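-- pv_equiv track=rewrite | github.com/rockers2004/AI | IFBWashingMachineService.py | get_intent
-- ===== SOURCE A (Python) =====
-- def get_intent(lemmas):
--     if any(w in lemmas for w in ['book', 'service', 'repair', 'technician']):
--         return 'book_service'
--     elif any(w in lemmas for w in ['status', 'check', 'track']):
--         return 'track_service'
--     elif any(w in lemmas for w in ['cancel']):
--         return 'cancel_service'
--     elif any(w in lemmas for w in ['help', 'support']):
--         return 'support'
--     elif any(w in lemmas for w in ['exit', 'bye', 'quit']):
--         return 'exit'
--     return 'unknown'
-- ===== SOURCE B (Python) =====
-- # One pass over the tokens keeping the minimum priority rank, then a rank->label table.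
-- RANK = {'book': 0, 'service': 0, 'repair': 0, 'technician': 0,
--         'status': 1, 'check': 1, 'track': 1,
--         'cancel': 2,
--         'help': 3, 'support': 3,
--         'exit': 4, 'bye': 4, 'quit': 4}
-- LABELS = ['book_service', 'track_service', 'cancel_service', 'support', 'exit', 'unknown']
--
-- def get_intent(lemmas):
--     best = 5
--     for lemma in lemmas:
--         best = min(best, RANK.get(lemma, 5))
--     return LABELS[best]
-- ===== Notes on version B (the rewrite author's own statement) =====
-- stated objective: alternative
-- what changed: Replaces A's five sequential any-scans of fixed keyword groups over the token list by a single pass over the tokens that keeps the minimum priority rank from a keyword->rank table, then indexes a rank->label list.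
import Mathlib
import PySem

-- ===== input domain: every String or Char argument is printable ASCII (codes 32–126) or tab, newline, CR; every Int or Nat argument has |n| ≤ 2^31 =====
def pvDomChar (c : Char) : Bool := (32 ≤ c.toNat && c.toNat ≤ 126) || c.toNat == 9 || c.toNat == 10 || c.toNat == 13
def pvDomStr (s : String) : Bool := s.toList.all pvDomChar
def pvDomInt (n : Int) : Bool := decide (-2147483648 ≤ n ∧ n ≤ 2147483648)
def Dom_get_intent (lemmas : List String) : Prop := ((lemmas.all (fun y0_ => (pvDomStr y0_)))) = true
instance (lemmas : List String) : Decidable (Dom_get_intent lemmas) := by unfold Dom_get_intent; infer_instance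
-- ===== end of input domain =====

set_option maxHeartbeats 1000000


-- B replaces A's five sequential keyword-group scans by one pass over the tokens
-- keeping the minimum priority rank from a keyword->rank table (alternative decomposition).

-- ===== PORT A =====
def get_intent (lemmas : List String) : String :=
  if ["book", "service", "repair", "technician"].any (fun w => lemmas.contains w) then "book_service"
  else if ["status", "check", "track"].any (fun w => lemmas.contains w) then "track_service"
  else if ["cancel"].any (fun w => lemmas.contains w) then "cancel_service"
  else if ["help", "support"].any (fun w => lemmas.contains w) then "support"
  else if ["exit", "bye", "quit"].any (fun w => lemmas.contains w) then "exit"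
  else "unknown"

-- ===== PORT B =====
-- the dict literal RANK (distinct keys, insertion order as written)
def pvRankDict : PySem.Dict String Nat := PySem.Dict.mk
  [("book", 0), ("service", 0), ("repair", 0), ("technician", 0),
   ("status", 1), ("check", 1), ("track", 1),
   ("cancel", 2),
   ("help", 3), ("support", 3),
   ("exit", 4), ("bye", 4), ("quit", 4)]

def pvLabels : List String := ["book_service", "track_service", "cancel_service", "support", "exit", "unknown"]

def get_intent_alt (lemmas : List String) : String :=
  let best := lemmas.foldl (fun b lemma_ => min b (pvRankDict.getD lemma_ 5)) 5
  -- LABELS[best]: best ≤ 5 always, so the index is in range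
  pvLabels.getD best "unknown"

-- ===== PRECONDITION & SPEC =====
def Spec_get_intent (lemmas : List String) (out : String) : Prop := out = get_intent_alt lemmas
instance (lemmas : List String) (out : String) : Decidable (Spec_get_intent lemmas out) := by unfold Spec_get_intent; infer_instance

-- ===== CLAIM (what is proved, stated in full; the proofs are below) =====
def Claim_equal_get_intent : Prop := ∀ (lemmas : List String), Dom_get_intent lemmas → Spec_get_intent lemmas (get_intent lemmas)

-- ===== LEMMAS AND PROOFS =====

def pvRank (l : String) : Nat := pvRankDict.getD l 5

theorem getD_mk_cons_ne (k x : String) (h : ¬ k = x) (v : Nat) (rest : List (String × Nat)) (d : Nat) :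
    (PySem.Dict.mk ((k, v) :: rest)).getD x d = (PySem.Dict.mk rest).getD x d := by
  rw [PySem.Dict.getD_eq_get?_getD, PySem.Dict.get?_mk_cons, if_neg (by simp [h]),
    ← PySem.Dict.getD_eq_get?_getD]

-- a lemma that is none of the 13 keywords gets the default rank 5
theorem pvRank_default (l : String) (h1 : ¬ "book" = l) (h2 : ¬ "service" = l)
    (h3 : ¬ "repair" = l) (h4 : ¬ "technician" = l) (h5 : ¬ "status" = l)
    (h6 : ¬ "check" = l) (h7 : ¬ "track" = l) (h8 : ¬ "cancel" = l)
    (h9 : ¬ "help" = l) (h10 : ¬ "support" = l) (h11 : ¬ "exit" = l)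
    (h12 : ¬ "bye" = l) (h13 : ¬ "quit" = l) : pvRank l = 5 := by
  unfold pvRank pvRankDict
  rw [getD_mk_cons_ne _ _ h1, getD_mk_cons_ne _ _ h2, getD_mk_cons_ne _ _ h3,
    getD_mk_cons_ne _ _ h4, getD_mk_cons_ne _ _ h5, getD_mk_cons_ne _ _ h6,
    getD_mk_cons_ne _ _ h7, getD_mk_cons_ne _ _ h8, getD_mk_cons_ne _ _ h9,
    getD_mk_cons_ne _ _ h10, getD_mk_cons_ne _ _ h11, getD_mk_cons_ne _ _ h12,
    getD_mk_cons_ne _ _ h13]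
  rfl

-- a lemma with rank below the default is one of the 13 keywords
theorem pvRank_mem (l : String) (h : pvRank l ≤ 4) :
    "book" = l ∨ "service" = l ∨ "repair" = l ∨ "technician" = l ∨ "status" = l ∨
    "check" = l ∨ "track" = l ∨ "cancel" = l ∨ "help" = l ∨ "support" = l ∨
    "exit" = l ∨ "bye" = l ∨ "quit" = l := by
  by_cases h1 : "book" = l
  · exact Or.inl h1
  by_cases h2 : "service" = l
  · exact Or.inr (Or.inl h2)
  by_cases h3 : "repair" = l
  · exact Or.inr (Or.inr (Or.inl h3))
  by_cases h4 : "technician" = l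
  · exact Or.inr (Or.inr (Or.inr (Or.inl h4)))
  by_cases h5 : "status" = l
  · exact Or.inr (Or.inr (Or.inr (Or.inr (Or.inl h5))))
  by_cases h6 : "check" = l
  · exact Or.inr (Or.inr (Or.inr (Or.inr (Or.inr (Or.inl h6)))))
  by_cases h7 : "track" = l
  · exact Or.inr (Or.inr (Or.inr (Or.inr (Or.inr (Or.inr (Or.inl h7))))))
  by_cases h8 : "cancel" = l
  · exact Or.inr (Or.inr (Or.inr (Or.inr (Or.inr (Or.inr (Or.inr (Or.inl h8)))))))
  by_cases h9 : "help" = l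
  · exact Or.inr (Or.inr (Or.inr (Or.inr (Or.inr (Or.inr (Or.inr (Or.inr (Or.inl h9))))))))
  by_cases h10 : "support" = l
  · exact Or.inr (Or.inr (Or.inr (Or.inr (Or.inr (Or.inr (Or.inr (Or.inr (Or.inr (Or.inl h10)))))))))
  by_cases h11 : "exit" = l
  · exact Or.inr (Or.inr (Or.inr (Or.inr (Or.inr (Or.inr (Or.inr (Or.inr (Or.inr (Or.inr (Or.inl h11))))))))))
  by_cases h12 : "bye" = l
  · exact Or.inr (Or.inr (Or.inr (Or.inr (Or.inr (Or.inr (Or.inr (Or.inr (Or.inr (Or.inr (Or.inr (Or.inl h12)))))))))))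
  by_cases h13 : "quit" = l
  · exact Or.inr (Or.inr (Or.inr (Or.inr (Or.inr (Or.inr (Or.inr (Or.inr (Or.inr (Or.inr (Or.inr (Or.inr h13)))))))))))
  rw [pvRank_default l h1 h2 h3 h4 h5 h6 h7 h8 h9 h10 h11 h12 h13] at h
  omega

theorem foldl_min_le_iff (lemmas : List String) (b k : Nat) :
    lemmas.foldl (fun b l => min b (pvRank l)) b ≤ k ↔ b ≤ k ∨ ∃ l ∈ lemmas, pvRank l ≤ k := by
  induction lemmas generalizing b with
  | nil => simp
  | cons x xs ih =>
      simp only [List.foldl_cons, ih, min_le_iff, List.mem_cons]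
      constructor
      · rintro (( h | h) | ⟨l, hl, h⟩)
        · exact Or.inl h
        · exact Or.inr ⟨x, Or.inl rfl, h⟩
        · exact Or.inr ⟨l, Or.inr hl, h⟩
      · rintro (h | ⟨l, (rfl | hl), h⟩)
        · exact Or.inl (Or.inl h)
        · exact Or.inl (Or.inr h)
        · exact Or.inr ⟨l, hl, h⟩

theorem get_intent_eq (lemmas : List String) : get_intent lemmas = get_intent_alt lemmas := by
  unfold get_intent get_intent_alt
  have hfold : ∀ k, lemmas.foldl (fun b l => min b (pvRankDict.getD l 5)) 5 ≤ k ↔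
      5 ≤ k ∨ ∃ l ∈ lemmas, pvRank l ≤ k := by
    intro k; exact foldl_min_le_iff lemmas 5 k
  set best := lemmas.foldl (fun b l => min b (pvRankDict.getD l 5)) 5 with hbest
  simp only [List.any_cons, List.any_nil, Bool.or_false, Bool.or_eq_true,
    List.contains_eq_mem, decide_eq_true_eq]
  split_ifs with h0 h1 h2 h3 h4
  · have : best ≤ 0 := by
      rw [hfold]
      refine Or.inr ?_
      rcases h0 with h | h | h | h <;> exact ⟨_, h, by decide⟩
    have : best = 0 := by omega
    rw [this]; rfl
  · have hub : best ≤ 1 := by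
      rw [hfold]
      refine Or.inr ?_
      rcases h1 with h | h | h <;> exact ⟨_, h, by decide⟩
    have hlb : ¬ best ≤ 0 := by
      rw [hfold]
      rintro (h | ⟨l, hl, hr⟩)
      · omega
      rcases pvRank_mem l (by omega) with rfl | rfl | rfl | rfl | rfl | rfl | rfl | rfl | rfl | rfl | rfl | rfl | rfl
      · exact h0 (Or.inl hl)
      · exact h0 (Or.inr (Or.inl hl))
      · exact h0 (Or.inr (Or.inr (Or.inl hl)))
      · exact h0 (Or.inr (Or.inr (Or.inr hl)))
      all_goals exact absurd hr (by decide)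
    have : best = 1 := by omega
    rw [this]; rfl
  · have hub : best ≤ 2 := by
      rw [hfold]
      exact Or.inr ⟨_, h2, by decide⟩
    have hlb : ¬ best ≤ 1 := by
      rw [hfold]
      rintro (h | ⟨l, hl, hr⟩)
      · omega
      rcases pvRank_mem l (by omega) with rfl | rfl | rfl | rfl | rfl | rfl | rfl | rfl | rfl | rfl | rfl | rfl | rfl
      · exact h0 (Or.inl hl)
      · exact h0 (Or.inr (Or.inl hl))
      · exact h0 (Or.inr (Or.inr (Or.inl hl)))
      · exact h0 (Or.inr (Or.inr (Or.inr hl)))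
      · exact h1 (Or.inl hl)
      · exact h1 (Or.inr (Or.inl hl))
      · exact h1 (Or.inr (Or.inr hl))
      all_goals exact absurd hr (by decide)
    have : best = 2 := by omega
    rw [this]; rfl
  · have hub : best ≤ 3 := by
      rw [hfold]
      refine Or.inr ?_
      rcases h3 with h | h <;> exact ⟨_, h, by decide⟩
    have hlb : ¬ best ≤ 2 := by
      rw [hfold]
      rintro (h | ⟨l, hl, hr⟩)
      · omega
      rcases pvRank_mem l (by omega) with rfl | rfl | rfl | rfl | rfl | rfl | rfl | rfl | rfl | rfl | rfl | rfl | rfl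
      · exact h0 (Or.inl hl)
      · exact h0 (Or.inr (Or.inl hl))
      · exact h0 (Or.inr (Or.inr (Or.inl hl)))
      · exact h0 (Or.inr (Or.inr (Or.inr hl)))
      · exact h1 (Or.inl hl)
      · exact h1 (Or.inr (Or.inl hl))
      · exact h1 (Or.inr (Or.inr hl))
      · exact h2 hl
      all_goals exact absurd hr (by decide)
    have : best = 3 := by omega
    rw [this]; rfl
  · have hub : best ≤ 4 := by
      rw [hfold]
      refine Or.inr ?_
      rcases h4 with h | h | h <;> exact ⟨_, h, by decide⟩
    have hlb : ¬ best ≤ 3 := by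
      rw [hfold]
      rintro (h | ⟨l, hl, hr⟩)
      · omega
      rcases pvRank_mem l (by omega) with rfl | rfl | rfl | rfl | rfl | rfl | rfl | rfl | rfl | rfl | rfl | rfl | rfl
      · exact h0 (Or.inl hl)
      · exact h0 (Or.inr (Or.inl hl))
      · exact h0 (Or.inr (Or.inr (Or.inl hl)))
      · exact h0 (Or.inr (Or.inr (Or.inr hl)))
      · exact h1 (Or.inl hl)
      · exact h1 (Or.inr (Or.inl hl))
      · exact h1 (Or.inr (Or.inr hl))
      · exact h2 hl
      · exact h3 (Or.inl hl)
      · exact h3 (Or.inr hl)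
      all_goals exact absurd hr (by decide)
    have : best = 4 := by omega
    rw [this]; rfl
  · have hub : best ≤ 5 := by rw [hfold]; exact Or.inl le_rfl
    have hlb : ¬ best ≤ 4 := by
      rw [hfold]
      rintro (h | ⟨l, hl, hr⟩)
      · omega
      rcases pvRank_mem l hr with rfl | rfl | rfl | rfl | rfl | rfl | rfl | rfl | rfl | rfl | rfl | rfl | rfl
      · exact h0 (Or.inl hl)
      · exact h0 (Or.inr (Or.inl hl))
      · exact h0 (Or.inr (Or.inr (Or.inl hl)))
      · exact h0 (Or.inr (Or.inr (Or.inr hl)))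
      · exact h1 (Or.inl hl)
      · exact h1 (Or.inr (Or.inl hl))
      · exact h1 (Or.inr (Or.inr hl))
      · exact h2 hl
      · exact h3 (Or.inl hl)
      · exact h3 (Or.inr hl)
      · exact h4 (Or.inl hl)
      · exact h4 (Or.inr (Or.inl hl))
      · exact h4 (Or.inr (Or.inr hl))
    have : best = 5 := by omega
    rw [this]; rfl

-- ===== VERDICT (by name: the statement is the Claim_ definition above) =====
theorem get_intent_spec : Claim_equal_get_intent := by
  intro lemmas _
  unfold Spec_get_intent
  exact get_intent_eq lemmas
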